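-- pv_equiv track=rewrite | github.com/aleksandarbos/codility-training-solved-tasks-python | l05_e03_v04.py | solution
-- ===== SOURCE A (Python) =====
-- def is_prime(num):
--     if num <= 1:
--         return False
--
--     i = 2
--     while i*i <= num:
--         if num % i == 0:
--             return False
--         i += 1
--
--     return True
--
-- def solution(A, Q):
--     N = len(A)
--     sums = [0] * (N+1)
--     results = []
--
--     for i in range(N):  # O(n)
--         sums[i+1] = sums[i] + (1 if is_prime(A[i]) else 0)
--
--     for start, end in Q:
--         results.append(sums[end+1] - sums[start])
--
--     return results
-- ===== SOURCE B (Python) =====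
-- def solution(A, Q):
--     # Sieve of Eratosthenes over [0, max(A)] replaces per-element trial division;
--     # prefix sums of the primality indicators answer each query in O(1).
--     if A:
--         size = max(max(A) + 1, 2)
--     else:
--         size = 2
--     is_p = [False, False] + [True] * (size - 2)
--     for d in range(2, size):
--         for j in range(2 * d, size, d):
--             is_p[j] = False
--     sums = [0]
--     for v in A:
--         sums.append(sums[-1] + (1 if 0 <= v and is_p[v] else 0))
--     return [sums[e + 1] - sums[s] for s, e in Q]
-- ===== Notes on version B (the rewrite author's own statement) =====
-- stated objective: alternative
-- what changed: Replaces per-element trial-division primality testing with a single Sieve of Eratosthenes over [0, max(A)] (0, 1 and negatives non-prime), builds the prefix sums by appending to a running list instead of writing into a preallocated array, and answers queries with a list comprehension.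
import Mathlib
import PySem

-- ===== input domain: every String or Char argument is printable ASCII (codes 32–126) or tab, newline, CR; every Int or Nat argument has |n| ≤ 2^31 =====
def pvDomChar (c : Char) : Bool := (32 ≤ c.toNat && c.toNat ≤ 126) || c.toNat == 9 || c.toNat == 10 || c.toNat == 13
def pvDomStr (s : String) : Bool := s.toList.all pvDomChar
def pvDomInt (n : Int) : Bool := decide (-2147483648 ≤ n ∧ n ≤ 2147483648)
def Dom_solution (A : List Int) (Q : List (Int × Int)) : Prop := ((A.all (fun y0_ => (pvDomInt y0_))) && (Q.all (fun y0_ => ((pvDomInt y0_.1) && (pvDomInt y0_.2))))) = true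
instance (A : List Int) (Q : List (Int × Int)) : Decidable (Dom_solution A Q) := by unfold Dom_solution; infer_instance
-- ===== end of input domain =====

-- B replaces per-element trial-division primality with one Sieve of Eratosthenes over [0, max(A)]
-- plus the same prefix-sum queries (objective: alternative algorithm).

-- ===== PORT A =====
-- while i*i <= num: ...  (i increases; i ≤ i*i ≤ num bounds the loop)
theorem pvIsPrimeLoop_dec (num i : Int) (h : i * i ≤ num) :
    (num + 2 - (i + 1)).toNat < (num + 2 - i).toNat := by
  have hii : i ≤ i * i := by nlinarith [sq_nonneg (i - 1)]
  omega

def isPrimeLoop (num i : Int) : Bool :=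
  if h : i * i ≤ num then
    if PySem.Int.mod num i == 0 then false
    else isPrimeLoop num (i + 1)
  else true
termination_by (num + 2 - i).toNat
decreasing_by exact pvIsPrimeLoop_dec num i h

def isPrime (num : Int) : Bool :=
  if num ≤ 1 then false else isPrimeLoop num 2

-- sums[i+1] = sums[i] + (1 if is_prime(A[i]) else 0)   (indices are in range by construction,
-- so the total pyGetD/pySetD forms are exact)
def pvSumsA (A : List Int) : List Int :=
  (PySem.List.pyRange 0 (A.length : Int) 1).foldl
    (fun s i => PySem.List.pySetD s (i + 1)
      (PySem.List.pyGetD s i 0 + (if isPrime (PySem.List.pyGetD A i 0) then 1 else 0)))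
    (List.replicate ((A.length : Int) + 1).toNat 0)

def solution (A : List Int) (Q : List (Int × Int)) : List Int :=
  Q.foldl (fun r se =>
      r ++ [PySem.List.pyGetD (pvSumsA A) (se.2 + 1) 0 - PySem.List.pyGetD (pvSumsA A) se.1 0]) []

-- ===== PORT B =====
-- size = max(max(A) + 1, 2) if A else 2
def pvSizeB (A : List Int) : Int :=
  match PySem.List.max? A (fun x => x) with
  | some m => max (m + 1) 2
  | none => 2

-- is_p = [False, False] + [True]*(size-2), then the two sieve-marking loops
def pvIsP (A : List Int) : List Bool :=
  (PySem.List.pyRange 2 (pvSizeB A) 1).foldl (fun l d =>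
      (PySem.List.pyRange (2 * d) (pvSizeB A) d).foldl (fun l j => PySem.List.pySetD l j false) l)
    ([false, false] ++ List.replicate (pvSizeB A - 2).toNat true)

-- sums.append(sums[-1] + (1 if 0 <= v and is_p[v] else 0))   (v ≤ max(A) < size keeps is_p[v] in range)
def pvSumsB (A : List Int) : List Int :=
  A.foldl (fun s v =>
      s ++ [PySem.List.pyGetD s (-1) 0 +
            (if 0 ≤ v ∧ PySem.List.pyGetD (pvIsP A) v false = true then 1 else 0)]) [0]

def solution_alt (A : List Int) (Q : List (Int × Int)) : List Int :=
  Q.map (fun se => PySem.List.pyGetD (pvSumsB A) (se.2 + 1) 0 - PySem.List.pyGetD (pvSumsB A) se.1 0)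

-- ===== PRECONDITION & SPEC =====
-- Pre_ excludes exactly the queries on which Python A raises IndexError
-- (sums[end+1] or sums[start] out of range, len(sums) = len(A)+1); B raises on the same inputs.
def Pre_solution (A : List Int) (Q : List (Int × Int)) : Prop :=
  ∀ p ∈ Q, PySem.Raise.InRange (A.length + 1) p.1 ∧ PySem.Raise.InRange (A.length + 1) (p.2 + 1)
instance (A : List Int) (Q : List (Int × Int)) : Decidable (Pre_solution A Q) := by
  unfold Pre_solution; infer_instance

def pvWitness_solution : List Int × (List (Int × Int)) := ([2, 3, 4, 5], [(0, 3), (1, 2), (-5, -1)])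

def Spec_solution (A : List Int) (Q : List (Int × Int)) (out : List Int) : Prop := out = solution_alt A Q
instance (A : List Int) (Q : List (Int × Int)) (out : List Int) : Decidable (Spec_solution A Q out) := by unfold Spec_solution; infer_instance

-- ===== CLAIM (what is proved, stated in full; the proofs are below) =====
def Claim_equal_solution : Prop := ∀ (A : List Int) (Q : List (Int × Int)), Dom_solution A Q → Pre_solution A Q → Spec_solution A Q (solution A Q)

-- ===== LEMMAS AND PROOFS =====
-- ---------- prefix-sum skeleton ----------
def pvPfx (g : Int → Int) : Int → List Int → List Int
  | a, [] => [a]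
  | a, v :: t => a :: pvPfx g (a + g v) t

theorem pvPfx_congr (g1 g2 : Int → Int) (a : Int) (l : List Int)
    (h : ∀ v ∈ l, g1 v = g2 v) : pvPfx g1 a l = pvPfx g2 a l := by
  induction l generalizing a with
  | nil => rfl
  | cons v t ih =>
      simp only [pvPfx, h v (by simp)]
      rw [ih _ (fun x hx => h x (by simp [hx]))]

theorem pvPfx_length (g : Int → Int) (a : Int) (l : List Int) :
    (pvPfx g a l).length = l.length + 1 := by
  induction l generalizing a with
  | nil => rfl
  | cons v t ih => simp [pvPfx, ih]

theorem pvPfx_append_singleton (g : Int → Int) (a : Int) (l : List Int) (v : Int) :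
    pvPfx g a (l ++ [v]) = pvPfx g a l ++ [a + (l.map g).sum + g v] := by
  induction l generalizing a with
  | nil => simp [pvPfx]
  | cons w t ih => simp [pvPfx, ih]; ring_nf

theorem pvPfx_getD_last (g : Int → Int) (a : Int) (l : List Int) :
    (pvPfx g a l).getD l.length 0 = a + (l.map g).sum := by
  induction l generalizing a with
  | nil => simp [pvPfx]
  | cons w t ih =>
      show (a :: pvPfx g (a + g w) t).getD (t.length + 1) 0 = _
      rw [List.getD_cons_succ, ih]
      simp only [List.map_cons, List.sum_cons]
      ring

-- ---------- B's sums loop = pvPfx ----------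
theorem pvFoldlB (g : Int → Int) (l : List Int) (s0 : List Int) (a : Int) :
    l.foldl (fun s v => s ++ [PySem.List.pyGetD s (-1) 0 + g v]) (s0 ++ [a])
      = s0 ++ pvPfx g a l := by
  induction l generalizing s0 a with
  | nil => simp [pvPfx]
  | cons v t ih =>
      simp only [List.foldl_cons, PySem.List.pyGetD_neg_one_append_singleton]
      have : s0 ++ [a] ++ [a + g v] = (s0 ++ [a]) ++ [a + g v] := by simp
      rw [List.append_assoc s0 [a] [a + g v]] at this ⊢
      have h2 := ih (s0 ++ [a]) (a + g v)
      simpa [pvPfx] using h2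

-- ---------- A's sums loop = pvPfx ----------
theorem pvFoldlA (g : Int → Int) (A : List Int) (k : Nat) (hk : k ≤ A.length) :
    (PySem.List.pyRange 0 (k : Int) 1).foldl
      (fun s i => PySem.List.pySetD s (i + 1)
        (PySem.List.pyGetD s i 0 + g (PySem.List.pyGetD A i 0)))
      (List.replicate (A.length + 1) 0)
      = pvPfx g 0 (A.take k) ++ List.replicate (A.length - k) 0 := by
  induction k with
  | zero => simp [pvPfx, List.replicate_succ]
  | succ k ih =>
      have hk' : k ≤ A.length := by omega
      have hcast : ((k : Int) + 1) = ((k + 1 : Nat) : Int) := by push_cast; ring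
      have hrange : PySem.List.pyRange 0 ((k+1 : Nat) : Int) 1
          = PySem.List.pyRange 0 (k : Int) 1 ++ [(k : Int)] := by
        rw [← hcast]
        exact PySem.List.pyRange_one_succ_right (by positivity)
      rw [hrange, List.foldl_append, ih hk']
      simp only [List.foldl_cons, List.foldl_nil]
      -- evaluate the one remaining step
      set pre := pvPfx g 0 (A.take k) with hpre
      have hprelen : pre.length = k + 1 := by
        rw [hpre, pvPfx_length, List.length_take]; omega
      have hget_s : PySem.List.pyGetD (pre ++ List.replicate (A.length - k) 0) (k : Int) 0
          = ((A.take k).map g).sum := by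
        rw [PySem.List.pyGetD_natCast]
        rw [List.getD_append _ _ _ _ (by omega)]
        have := pvPfx_getD_last g 0 (A.take k)
        rw [List.length_take, min_eq_left hk'] at this
        rw [hpre]
        simpa using this
      have hget_A : PySem.List.pyGetD A (k : Int) 0 = A.getD k 0 := PySem.List.pyGetD_natCast A k 0
      rw [hget_s, hget_A]
      -- pySetD at k+1
      have hlen : (pre ++ List.replicate (A.length - k) 0).length = A.length + 1 := by
        simp [hprelen]; omega
      have hset : PySem.List.pySetD (pre ++ List.replicate (A.length - k) 0) ((k : Int) + 1)
            (((A.take k).map g).sum + g (A.getD k 0))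
          = (pre ++ List.replicate (A.length - k) 0).set (k+1)
            (((A.take k).map g).sum + g (A.getD k 0)) := by
        rw [hcast]
        simp only [PySem.List.pySetD, PySem.List.pySet?, PySem.List.pyIdx?, hlen]
        rw [if_pos (by positivity), if_pos (by exact_mod_cast Nat.lt_succ_of_le hk)]
        simp
      rw [hset]
      have hrep : List.replicate (A.length - k) (0:Int) = 0 :: List.replicate (A.length - (k+1)) 0 := by
        rw [← List.replicate_succ]; congr 1; omega
      rw [List.set_append_right _ _ hprelen.le, hprelen, Nat.sub_self, hrep, List.set_cons_zero]
      have hk2 : k < A.length := by omega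
      have htake : A.take (k+1) = A.take k ++ [A.getD k 0] := by
        rw [List.take_add_one, List.getElem?_eq_getElem hk2, List.getD_eq_getElem _ _ hk2]
        rfl
      rw [htake, pvPfx_append_singleton, hpre]
      simp

-- ---------- trial division characterization ----------
theorem isPrimeLoop_iff : ∀ (fuel : Nat) (num i : Int), (num + 2 - i).toNat ≤ fuel → 2 ≤ i →
    (isPrimeLoop num i = true ↔ ∀ d : Int, i ≤ d → d * d ≤ num → ¬ d ∣ num) := by
  intro fuel
  induction fuel with
  | zero =>
      intro num i hf h2
      rw [isPrimeLoop]
      have hii : ¬ i * i ≤ num := by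
        intro hc
        have : i ≤ i * i := by nlinarith
        omega
      rw [dif_neg hii]
      constructor
      · intro _ d hd hdd
        have : i * i ≤ d * d := mul_self_le_mul_self (by omega) hd
        omega
      · intro _; rfl
  | succ f ih =>
      intro num i hf h2
      rw [isPrimeLoop]
      by_cases hii : i * i ≤ num
      · rw [dif_pos hii]
        by_cases hmod : PySem.Int.mod num i == 0
        · rw [if_pos hmod]
          have hdvd : i ∣ num := (PySem.Int.mod_eq_zero_iff_dvd num i).1 (by simpa using hmod)
          simp only [Bool.false_eq_true, false_iff]
          push_neg
          exact ⟨i, le_rfl, hii, hdvd⟩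
        · rw [if_neg hmod]
          have hnd : ¬ i ∣ num := fun hd =>
            hmod (by simp [(PySem.Int.mod_eq_zero_iff_dvd num i).2 hd])
          have hdec := pvIsPrimeLoop_dec num i hii
          rw [ih num (i + 1) (by omega) (by omega)]
          constructor
          · intro h d hd hdd
            rcases eq_or_lt_of_le hd with rfl | hlt
            · exact hnd
            · exact h d (by omega) hdd
          · intro h d hd hdd
            exact h d (by omega) hdd
      · rw [dif_neg hii]
        constructor
        · intro _ d hd hdd
          have : i * i ≤ d * d := mul_self_le_mul_self (by omega) hd
          omega
        · intro _; rfl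

theorem isPrime_iff (v : Int) : isPrime v = true ↔ 2 ≤ v ∧ Nat.Prime v.toNat := by
  unfold isPrime
  by_cases h : v ≤ 1
  · simp only [if_pos h, Bool.false_eq_true, false_iff]
    intro hc
    omega
  · rw [if_neg h]
    have h2 : (2 : Int) ≤ v := by omega
    have hvn : ((v.toNat : Int)) = v := Int.toNat_of_nonneg (by omega)
    rw [isPrimeLoop_iff ((v + 2 - 2).toNat) v 2 le_rfl le_rfl]
    constructor
    · intro hnd
      refine ⟨h2, ?_⟩
      rw [Nat.prime_def_le_sqrt]
      refine ⟨by omega, ?_⟩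
      intro m hm hms hdvd
      refine hnd (m : Int) (by exact_mod_cast hm) ?_ ?_
      · have hmm : m * m ≤ v.toNat := Nat.le_sqrt.1 hms
        have := (Nat.cast_le (α := Int)).2 hmm
        push_cast at this
        omega
      · rw [← hvn]
        exact_mod_cast hdvd
    · rintro ⟨_, hp⟩ d hd hdd hdvd
      have hdn : 2 ≤ d.toNat := by omega
      have hdd' : d.toNat * d.toNat ≤ v.toNat := by
        have h1 : ((d.toNat * d.toNat : Nat) : Int) ≤ ((v.toNat : Nat) : Int) := by
          push_cast
          rw [Int.toNat_of_nonneg (by omega : (0:Int) ≤ d), hvn]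
          exact hdd
        exact_mod_cast h1
      have hdvd' : d.toNat ∣ v.toNat := by
        have : ((d.toNat : Int)) ∣ ((v.toNat : Int)) := by
          rw [Int.toNat_of_nonneg (by omega : (0:Int) ≤ d), hvn]
          exact hdvd
        exact_mod_cast this
      exact (Nat.prime_def_le_sqrt.1 hp).2 d.toNat hdn (Nat.le_sqrt.2 hdd') hdvd'

-- ---------- sieve pointwise characterization ----------
theorem pvSetD_getD_false (l : List Bool) (j : Int) (hj : 0 ≤ j) (v : Nat) :
    (PySem.List.pySetD l j false).getD v false = (l.getD v false && !(j.toNat == v)) := by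
  simp only [PySem.List.pySetD, PySem.List.pySet?, PySem.List.pyIdx?, if_pos hj]
  by_cases hlt : j < (l.length : Int)
  · rw [if_pos hlt]
    simp only [Option.map_some, Option.getD_some]
    by_cases hv : j.toNat = v
    · subst hv
      rcases Nat.lt_or_ge j.toNat l.length with hv2 | hv2
      · simp [List.getD_eq_getElem?_getD, List.getElem?_set, hv2]
      · simp [List.getD_eq_getElem?_getD, List.getElem?_set, Nat.not_lt.2 hv2,
          List.getElem?_eq_none_iff.2 hv2]
    · simp [List.getD_eq_getElem?_getD, List.getElem?_set, hv]
  · rw [if_neg hlt]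
    simp only [Option.map_none, Option.getD_none]
    by_cases hv : j.toNat = v
    · have hvlen : l.length ≤ v := by rw [← hv]; omega
      simp [List.getD_eq_getElem?_getD, List.getElem?_eq_none_iff.2 hvlen, hv]
    · simp [hv]

theorem pvInner (js : List Int) (l : List Bool) (v : Nat) (hj : ∀ j ∈ js, 0 ≤ j) :
    (js.foldl (fun l j => PySem.List.pySetD l j false) l).getD v false
      = (l.getD v false && !(js.any (fun j => j.toNat == v))) := by
  induction js generalizing l with
  | nil => simp
  | cons j t ih =>
      rw [List.foldl_cons, ih _ (fun x hx => hj x (by simp [hx]))]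
      rw [pvSetD_getD_false l j (hj j (by simp)) v]
      simp [Bool.and_assoc]

theorem pvOuter (ds : List Int) (size : Int) (l : List Bool) (v : Nat) (hd : ∀ d ∈ ds, 2 ≤ d) :
    ((ds.foldl (fun l d => (PySem.List.pyRange (2 * d) size d).foldl
        (fun l j => PySem.List.pySetD l j false) l) l).getD v false)
      = (l.getD v false &&
         !(ds.any (fun d => (PySem.List.pyRange (2 * d) size d).any (fun j => j.toNat == v)))) := by
  induction ds generalizing l with
  | nil => simp
  | cons d t ih =>
      rw [List.foldl_cons, ih _ (fun x hx => hd x (by simp [hx]))]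
      rw [pvInner _ _ _ (fun j hjm => ?_)]
      · simp [Bool.and_assoc]
      · have hd2 : (2:Int) ≤ d := hd d (by simp)
        have := (PySem.List.mem_pyRange_iff_of_pos (by omega : (0:Int) < d) j).1 hjm
        omega

def pvSieve (size : Int) : List Bool :=
  (PySem.List.pyRange 2 size 1).foldl (fun l d =>
      (PySem.List.pyRange (2 * d) size d).foldl (fun l j => PySem.List.pySetD l j false) l)
    ([false, false] ++ List.replicate (size - 2).toNat true)

theorem pvSieve_getD (size : Int) (n : Nat) (hn : (n : Int) < size) :
    (pvSieve size).getD n false = decide (Nat.Prime n) := by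
  unfold pvSieve
  rw [pvOuter _ _ _ _ (fun d hd => (PySem.List.mem_pyRange_one.1 hd).1)]
  have hinit : ([false, false] ++ List.replicate (size - 2).toNat true).getD n false
      = decide (2 ≤ n) := by
    match n, hn with
    | 0, _ => simp
    | 1, _ => simp
    | (m+2), hn =>
      have hm : m < (size - 2).toNat := by omega
      simp [List.getD_eq_getElem?_getD, hm]
  rw [hinit]
  have hmark : ((PySem.List.pyRange 2 size 1).any
        (fun d => (PySem.List.pyRange (2 * d) size d).any (fun j => j.toNat == n)))
      = decide (2 ≤ n ∧ ¬ Nat.Prime n) := by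
    rw [Bool.eq_iff_iff]
    rw [List.any_eq_true, decide_eq_true_iff]
    constructor
    · rintro ⟨d, hdmem, hinner⟩
      rw [List.any_eq_true] at hinner
      obtain ⟨j, hjmem, hjev⟩ := hinner
      have hd := PySem.List.mem_pyRange_one.1 hdmem
      have hj := (PySem.List.mem_pyRange_iff_of_pos (by omega : (0:Int) < d) j).1 hjmem
      have hjn : j = (n : Int) := by
        have := beq_iff_eq.1 hjev
        omega
      have hdvdj : d ∣ (n : Int) := by
        have h1 : d ∣ j - 2 * d := hj.2.2
        have h2 : d ∣ 2 * d := dvd_mul_left d 2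
        have := dvd_add h1 h2
        rw [hjn] at this
        simpa using this
      have h2dn : 2 * d ≤ (n : Int) := hjn ▸ hj.1
      have hn2 : 2 ≤ n := by omega
      refine ⟨hn2, fun hp => ?_⟩
      have hddvd : d.toNat ∣ n := by
        have hcast : ((d.toNat : Int)) ∣ (n : Int) := by
          rw [Int.toNat_of_nonneg (by omega : (0:Int) ≤ d)]
          exact hdvdj
        exact_mod_cast hcast
      rcases hp.eq_one_or_self_of_dvd d.toNat hddvd with h1 | h1
      · omega
      · omega
    · rintro ⟨hn2, hnp⟩
      obtain ⟨m, hmdvd, hm2, hmlt⟩ := Nat.exists_dvd_of_not_prime2 hn2 hnp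
      obtain ⟨c, hc⟩ := hmdvd
      have hc2 : 2 ≤ c := by
        match c, hc with
        | 0, hc => omega
        | 1, hc => omega
        | (c+2), _ => omega
      have h2m : 2 * m ≤ n := by
        have h := Nat.mul_le_mul_left m hc2
        omega
      refine ⟨(m : Int), PySem.List.mem_pyRange_one.2 ⟨by exact_mod_cast hm2, by omega⟩, ?_⟩
      rw [List.any_eq_true]
      have hm0 : (0:Int) < (m : Int) := by exact_mod_cast by omega
      refine ⟨(n : Int), (PySem.List.mem_pyRange_iff_of_pos hm0 _).2 ⟨by omega, hn, ?_⟩, by simp⟩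
      have hdvd : (m : Int) ∣ (n : Int) := by exact_mod_cast Dvd.intro c (by omega)
      exact dvd_sub hdvd (dvd_mul_left _ _)
  rw [hmark]
  by_cases hp : Nat.Prime n
  · simp [hp, hp.two_le]
  · by_cases h2n : 2 ≤ n
    · simp [hp, h2n]
    · simp [hp, h2n]


-- B-side increment as a named function (defeq to the ite in pvSumsB)
def pvGB (A : List Int) : Int → Int :=
  fun v => if 0 ≤ v ∧ PySem.List.pyGetD (pvIsP A) v false = true then 1 else 0

theorem pvIsP_eq (A : List Int) : pvIsP A = pvSieve (pvSizeB A) := rfl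

theorem pvSumsA_eq (A : List Int) :
    pvSumsA A = pvPfx (fun v => if isPrime v then (1:Int) else 0) 0 A := by
  unfold pvSumsA
  have hc : (((A.length : Int)) + 1).toNat = A.length + 1 := by omega
  rw [hc]
  have h := pvFoldlA (fun v => if isPrime v then (1:Int) else 0) A A.length le_rfl
  rw [List.take_length, Nat.sub_self] at h
  simpa using h

theorem pvSumsB_eq (A : List Int) : pvSumsB A = pvPfx (pvGB A) 0 A := by
  unfold pvSumsB
  have h := pvFoldlB (pvGB A) A [] 0
  simpa [pvGB] using h

theorem pvG_congr (A : List Int) (v : Int) (hv : v ∈ A) :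
    (if isPrime v then (1:Int) else 0) = pvGB A v := by
  cases hmax : PySem.List.max? A (fun x => x) with
  | none =>
      rw [PySem.List.max?_eq_none_iff] at hmax
      subst hmax
      simp at hv
  | some m =>
      have hle : v ≤ m := PySem.List.max?_isMax hmax v hv
      have hsize : pvSizeB A = max (m + 1) 2 := by unfold pvSizeB; rw [hmax]
      by_cases h0 : 0 ≤ v
      · have hvn : ((v.toNat : Int)) = v := Int.toNat_of_nonneg h0
        have hlt : ((v.toNat : Int)) < pvSizeB A := by
          rw [hvn, hsize]
          have := le_max_left (m + 1) 2
          omega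
        have hgetd : PySem.List.pyGetD (pvIsP A) v false = decide (Nat.Prime v.toNat) := by
          conv_lhs => rw [← hvn]
          rw [PySem.List.pyGetD_natCast]
          rw [pvIsP_eq]
          exact pvSieve_getD (pvSizeB A) v.toNat hlt
        by_cases hp : Nat.Prime v.toNat
        · have h2 : (2:Int) ≤ v := by have := hp.two_le; omega
          have hA : isPrime v = true := (isPrime_iff v).2 ⟨h2, hp⟩
          simp [pvGB, hgetd, hp, hA, h0]
        · have hA : isPrime v = false := by
            cases h : isPrime v
            · rfl
            · exact absurd ((isPrime_iff v).1 h).2 hp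
          simp [pvGB, hgetd, hp, hA]
      · have hA : isPrime v = false := by
          cases h : isPrime v
          · rfl
          · have := ((isPrime_iff v).1 h).1
            omega
        simp [pvGB, hA, h0]

theorem pvSums_eq (A : List Int) : pvSumsA A = pvSumsB A := by
  rw [pvSumsA_eq, pvSumsB_eq]
  exact pvPfx_congr _ _ _ _ (fun v hv => pvG_congr A v hv)

-- ===== VERDICT (by name: the statement is the Claim_ definition above) =====
theorem solution_spec : Claim_equal_solution := by
  unfold Claim_equal_solution
  intro A Q _ _
  unfold Spec_solution solution solution_alt
  have h := PySem.List.foldl_append_singleton_eq_map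
    (fun se : Int × Int =>
      PySem.List.pyGetD (pvSumsA A) (se.2 + 1) 0 - PySem.List.pyGetD (pvSumsA A) se.1 0) Q []
  rw [h, pvSums_eq]
  simp
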